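/-
  THE MAIN LOOP OF jsmn_parse, TRIP BY TRIP  (lemmas for Json/Jsmn/CorrectValue.lean).

  `Reaches s s'`: the loop started in state `s` comes, after some trips, to the loop head in state `s'` (with any amount of fuel that is
  enough for the rest of the text: at least `js.length + 1 - pos`; each trip uses one unit and advances `pos` by at least one).
  One lemma per kind of trip: whitespace (`skip_ws`), `:`, `,`, a string, a primitive, `[` / `{`, `]` / `}`.
  `Placed ts ts' sup m k new`: how a piece of text changes the token array: the tokens `new` stored from index `k` on, the `size` of
  the superior token `sup` raised by `m`, nothing else touched.
-/
import Json.Jsmn.Scan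

namespace Jsmn
open Json

section
variable (cfg : Config) (js : List UInt8) (n : Nat)

/-- From the loop head in state `s` the loop comes to the loop head in state `s'`. -/
def Reaches (s s' : St) : Prop :=
  ∀ fuel, js.length < fuel + s.p.pos → ∃ fuel', js.length < fuel' + s'.p.pos ∧ loop cfg js n fuel s = loop cfg js n fuel' s'

theorem Reaches.refl (s : St) : Reaches cfg js n s s := fun fuel h => ⟨fuel, h, rfl⟩

variable {cfg js n}

theorem Reaches.trans {s1 s2 s3 : St} (h12 : Reaches cfg js n s1 s2) (h23 : Reaches cfg js n s2 s3) : Reaches cfg js n s1 s3 := by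
  intro fuel h
  obtain ⟨f2, h2, e2⟩ := h12 fuel h
  obtain ⟨f3, h3, e3⟩ := h23 f2 h2
  exact ⟨f3, h3, e2.trans e3⟩

/-- One trip: the character at `pos` is `c`, the body of the loop goes on with `s'`, `pos++`. -/
theorem Reaches.trip {s s' : St} {c : UInt8} {r : List UInt8} (hd : js.drop s.p.pos = c :: r) (hc : (c != 0) = true)
    (hb : ∀ fuel, js.length < fuel + s.p.pos → body cfg js fuel n s c = some (.next s'))
    (hpos : s.p.pos ≤ s'.p.pos) (hlt : s'.p.pos + 1 < 4294967296) :
    Reaches cfg js n s ⟨⟨s'.p.pos + 1, s'.p.toknext, s'.p.toksuper⟩, s'.toks, s'.count⟩ := by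
  intro fuel hf
  have := lt_of_drop hd
  obtain ⟨fuel, rfl⟩ : ∃ f, fuel = f + 1 := ⟨fuel - 1, by omega⟩
  refine ⟨fuel, by simp; omega, ?_⟩
  simp only [loop, more_of_drop hd hc, charAt_of_drop hd, if_true, hb (fuel + 1) hf]
  rw [u32_succ hlt]

/-- At the end of the text the loop ends: `finish`. -/
theorem loop_end {s : St} (hd : js.drop s.p.pos = []) (hle : s.p.pos ≤ js.length) {fuel : Nat} (hf : js.length < fuel + s.p.pos) :
    loop cfg js n fuel s = some (finish s, s) := by
  have := congrArg List.length hd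
  simp at this
  obtain ⟨fuel, rfl⟩ : ∃ f, fuel = f + 1 := ⟨fuel - 1, by omega⟩
  simp [loop, more_of_drop_nil hd]

/-! ### The trips that allocate nothing -/

theorem body_wsChar {c : UInt8} (hc : isWsChar c = true) (fuel : Nat) (s : St) : body cfg js fuel n s c = some (.next s) := by
  have h1 : (c == 0x7b || c == 0x5b) = false := by simp [isWsChar, beq_toNat] at *; omega
  have h2 : (c == 0x7d || c == 0x5d) = false := by simp [isWsChar, beq_toNat] at *; omega
  have h3 : (c == 0x22) = false := by simp [isWsChar, beq_toNat] at *; omega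
  have h4 : (c == 0x09 || c == 0x0d || c == 0x0a || c == 0x20) = true := by simp [isWsChar, beq_toNat] at *; omega
  simp only [body, h1, h2, h3, h4, Bool.false_eq_true, if_false, if_true]

/-- Whitespace is skipped. -/
theorem skip_ws (hjs : js.length < 4294967296) (k : Nat) (sup : Int) (toks : Option Tokens) (cnt : Int) :
    ∀ (w : List UInt8) (pos : Nat) (rest : List UInt8), IsWs w → js.drop pos = w ++ rest →
      Reaches cfg js n ⟨⟨pos, k, sup⟩, toks, cnt⟩ ⟨⟨pos + w.length, k, sup⟩, toks, cnt⟩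
  | [], pos, _, _, _ => Reaches.refl _ _ _ _
  | c :: w, pos, rest, hw, hd => by
    have hc : isWsChar c = true := hw c (by simp)
    have hd' : js.drop pos = c :: (w ++ rest) := by simpa using hd
    have h0 : (c != 0) = true := by simp [isWsChar, bne, beq_toNat] at *; omega
    have hlt := lt_of_drop hd'
    have t := Reaches.trip (cfg := cfg) (n := n) (s := ⟨⟨pos, k, sup⟩, toks, cnt⟩) hd' h0 (fun fuel _ => body_wsChar hc fuel _) (Nat.le_refl _)
      (by simp; omega)
    have ih := skip_ws hjs k sup toks cnt w (pos + 1) rest (fun x hx => hw x (by simp [hx])) (drop_succ hd')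
    have e : pos + (c :: w).length = pos + 1 + w.length := by simp; omega
    rw [e]
    exact t.trans ih

theorem body_colon (fuel : Nat) (s : St) :
    body cfg js fuel n s 0x3a = some (.next { s with p := { s.p with toksuper := i32 (s.p.toknext - 1) } }) := by
  simp [body]

/-! ### How a piece of text changes the token array -/

/-- `tokens[sup].size++` if `sup` is not -1. -/
def bump (ts : Tokens) (sup : Int) : Tokens :=
  if sup != -1 then tokUpd ts sup fun t => { t with size := i32 (t.size + 1) } else ts

theorem bumpSuper_some (p : Parser) (ts : Tokens) : bumpSuper p (some ts) = some (bump ts p.toksuper) := by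
  simp only [bumpSuper, bump]; split <;> rfl

/-- The superior token: none (-1), or an allocated token (below `k`) whose `size` is a count that cannot overflow. -/
def SupOk (ts : Tokens) (k : Nat) (sup : Int) (bound : Nat) : Prop :=
  sup = -1 ∨ ∃ a : Nat, sup = a ∧ a < k ∧ 0 ≤ (ts.getD a default).size ∧ (ts.getD a default).size ≤ bound

/-- `ts'` is `ts` with the tokens `new` stored from index `k` on (the `parent` field kept without parent links: `stampTok`), the `size` of
token `sup` (if not -1) raised by `m`, and nothing else changed. -/
structure Placed (cfg : Config) (ts ts' : Tokens) (sup : Int) (m : Int) (k : Nat) (new : List Token) : Prop where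
  len : ts'.length = ts.length
  sup_eq : ∀ a : Nat, sup = a → ts'.getD a default = { ts.getD a default with size := (ts.getD a default).size + m }
  new_eq : ∀ j, j < new.length → ts'.getD (k + j) default = stampTok cfg (new.getD j default) (ts.getD (k + j) default)
  other : ∀ i : Nat, (i : Int) ≠ sup → (i < k ∨ k + new.length ≤ i) → ts'.getD i default = ts.getD i default

/-- Storing one token at `k` and bumping `sup`. -/
theorem placed_scalar (cfg : Config) {ts : Tokens} {k : Nat} {sup : Int} {bound : Nat} (tok : Token) (hk : k < ts.length)
    (hsup : SupOk ts k sup bound) (hb : bound < 2147483647) :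
    Placed cfg ts (bump (ts.set k (stampTok cfg tok (ts.getD k default))) sup) sup 1 k [tok] := by
  rcases hsup with rfl | ⟨a, rfl, hak, h0, h1⟩
  · have : bump (ts.set k (stampTok cfg tok (ts.getD k default))) (-1) = ts.set k (stampTok cfg tok (ts.getD k default)) := by simp [bump]
    rw [this]
    refine ⟨by simp, fun a h => by omega, fun j hj => ?_, fun i _ hi => ?_⟩
    · have : j = 0 := by simpa using hj
      subst this; simp only [Nat.add_zero, getD_set_self _ _ hk]; rfl
    · exact getD_set_other _ _ (by simp at hi; omega)
  · have hne : ((a : Int) != -1) = true := by simp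
    have : bump (ts.set k (stampTok cfg tok (ts.getD k default))) a =
        (ts.set k (stampTok cfg tok (ts.getD k default))).set a { ts.getD a default with size := (ts.getD a default).size + 1 } := by
      simp only [bump, hne, if_true, tokUpd_nat, getD_set_other ts _ (Nat.ne_of_lt hak)]
      rw [i32_of_range (by omega) (by omega)]
    rw [this]
    refine ⟨by simp, fun a' h => ?_, fun j hj => ?_, fun i hia hi => ?_⟩
    · have : a' = a := by omega
      subst this; exact getD_set_self _ _ (by simp; omega)
    · have : j = 0 := by simpa using hj
      subst this
      simp only [Nat.add_zero]
      rw [getD_set_other _ _ (by omega), getD_set_self _ _ hk]; rfl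
    · rw [getD_set_other _ _ (by omega), getD_set_other _ _ (by simp at hi; omega)]

/-! ### The trips that allocate one token -/

/-- What jsmn_alloc_token + jsmn_fill_token (+ the parent link) store at `k`. -/
theorem alloc_fill (cfg : Config) (ts : Tokens) {k : Nat} (hk : k < ts.length) (ty : Nat) (s e sup : Int) :
    (let t := ts.getD k default
     let ts1 := ts.set k { t with start := -1, «end» := -1, size := 0, parent := if cfg.parentLinks then -1 else t.parent }
     let ts2 := ts1.set k (fillToken (ts1.getD k default) ty s e)
     if cfg.parentLinks then ts2.set k { ts2.getD k default with parent := sup } else ts2) =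
    ts.set k (stampTok cfg ⟨ty, s, e, 0, sup⟩ (ts.getD k default)) := by
  cases h : cfg.parentLinks <;> simp [hk, fillToken, stampTok, h, List.set_set]

/-- A string `"body"` (a value, or a key): one trip; a STRING token, the superior's size bumped. -/
theorem string_trip (hjs : js.length < 2147483648) {b : List UInt8} (hb : IsStringBody b) {pos k : Nat} {sup : Int} {ts : Tokens} {cnt : Int}
    {rest : List UInt8} (hd : js.drop pos = 0x22 :: b ++ 0x22 :: rest) (hlen : ts.length = n) (hk : k < n) (hn : n ≤ 2147483648)
    (hc0 : 0 ≤ cnt) (hc1 : cnt + 1 < 2147483648) :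
    Reaches cfg js n ⟨⟨pos, k, sup⟩, some ts, cnt⟩
      ⟨⟨pos + (1 + b.length + 1), k + 1, sup⟩,
        some (bump (ts.set k (stampTok cfg ⟨JSMN_STRING, (pos + 1 : Nat), (pos + 1 + b.length : Nat), 0, sup⟩ (ts.getD k default))) sup), cnt + 1⟩ := by
  have hd' : js.drop pos = 0x22 :: (b ++ 0x22 :: rest) := by simpa using hd
  have hlt := lt_of_drop hd'
  have hq := lt_of_drop (drop_advance (drop_succ hd'))
  have t := Reaches.trip (cfg := cfg) (n := n) (s := ⟨⟨pos, k, sup⟩, some ts, cnt⟩)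
    (s' := ⟨⟨pos + 1 + b.length, k + 1, sup⟩,
      some (bump (ts.set k (stampTok cfg ⟨JSMN_STRING, (pos + 1 : Nat), (pos + 1 + b.length : Nat), 0, sup⟩ (ts.getD k default))) sup), cnt + 1⟩)
    hd' (by decide) ?_ (by simp; omega) (by simp; omega)
  · have e : pos + (1 + b.length + 1) = pos + 1 + b.length + 1 := by omega
    rw [e]; exact t
  · intro fuel hf
    have hs := strScan_body js (by omega) hb fuel (pos + 1) rest (drop_succ hd') (by simp at hf; omega)
    have h1 : ((0x22 : UInt8) == 0x7b || (0x22 : UInt8) == 0x5b) = false := by decide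
    have h2 : ((0x22 : UInt8) == 0x7d || (0x22 : UInt8) == 0x5d) = false := by decide
    have hk' : ¬ (k ≥ n) := by omega
    simp only [body, h1, h2, Bool.false_eq_true, if_false, beq_self_eq_true, if_true, parseString]
    rw [u32_succ (by omega), hs]
    simp only [allocToken, hk', if_false]
    rw [u32_succ (by omega), i32_nat (by omega), show ((pos : Int) + 1) = ((pos + 1 : Nat) : Int) by simp, i32_nat (by omega), i32_nat (by omega)]
    have := alloc_fill cfg ts (by omega : k < ts.length) JSMN_STRING ((pos + 1 : Nat) : Int) ((pos + 1 + b.length : Nat) : Int) sup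
    simp only at this
    simp only [this, bumpSuper_some, i32_of_range (by omega : -2147483648 ≤ cnt + 1) hc1]
    simp

/-- What may follow a primitive: a stop character (whitespace `,` `]` `}`), or — not in strict mode — the end of the text. -/
def StopAfter (cfg : Config) (rest : List UInt8) : Prop := (rest = [] ∧ cfg.strict = false) ∨ ∃ c r, rest = c :: r ∧ primStop cfg c = true

/-- The superior token is one under which strict mode accepts a value: none, an array, or a key that has no value yet. -/
def SupType (ts : Tokens) (sup : Int) : Prop :=
  sup = -1 ∨ ∃ a : Nat, sup = a ∧
    ((ts.getD a default).type = JSMN_ARRAY ∨ ((ts.getD a default).type = JSMN_STRING ∧ (ts.getD a default).size = 0))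

theorem primChar_not_special {c : UInt8} (h : primChar c = true) :
    (c == 0x7b || c == 0x5b) = false ∧ (c == 0x7d || c == 0x5d) = false ∧ (c == 0x22) = false ∧
    (c == 0x09 || c == 0x0d || c == 0x0a || c == 0x20) = false ∧ (c == 0x3a) = false ∧ (c == 0x2c) = false := by
  simp [primChar, isDigit, beq_toNat] at *; omega

/-- A number or literal `t`: one trip; a PRIMITIVE token, the superior's size bumped; the loop goes on AT the byte behind `t`. -/
theorem prim_trip (hjs : js.length < 2147483648) {c0 : UInt8} {t' : List UInt8} (hc0 : primStart c0 = true)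
    (ht : ∀ x ∈ c0 :: t', primChar x = true) {pos k : Nat} {sup : Int} {ts : Tokens} {cnt : Int} {rest : List UInt8}
    (hd : js.drop pos = (c0 :: t') ++ rest) (hstop : StopAfter cfg rest) (hlen : ts.length = n) (hk : k < n) (hn : n ≤ 2147483648)
    (hcnt0 : 0 ≤ cnt) (hcnt1 : cnt + 1 < 2147483648) (hty : SupType ts sup) :
    Reaches cfg js n ⟨⟨pos, k, sup⟩, some ts, cnt⟩
      ⟨⟨pos + (c0 :: t').length, k + 1, sup⟩,
        some (bump (ts.set k (stampTok cfg ⟨JSMN_PRIMITIVE, pos, (pos + (c0 :: t').length : Nat), 0, sup⟩ (ts.getD k default))) sup), cnt + 1⟩ := by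
  have hd' : js.drop pos = c0 :: (t' ++ rest) := by simpa using hd
  have hlt := lt_of_drop hd'
  have hc : primChar c0 = true := ht c0 (by simp)
  have hq : pos + (c0 :: t').length ≤ js.length := by
    have := congrArg List.length hd
    simp at this; simp; omega
  have t := Reaches.trip (cfg := cfg) (n := n) (s := ⟨⟨pos, k, sup⟩, some ts, cnt⟩)
    (s' := ⟨⟨pos + t'.length, k + 1, sup⟩,
      some (bump (ts.set k (stampTok cfg ⟨JSMN_PRIMITIVE, pos, (pos + (c0 :: t').length : Nat), 0, sup⟩ (ts.getD k default))) sup), cnt + 1⟩)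
    hd' (primChar_ne_zero hc) ?_ (by simp) (by simp at hq ⊢; omega)
  · have e : pos + (c0 :: t').length = pos + t'.length + 1 := by simp; omega
    rw [e]; exact t
  · intro fuel hf
    obtain ⟨h1, h2, h3, h4, h5, h6⟩ := primChar_not_special hc
    have hk' : ¬ (k ≥ n) := by omega
    have hforb : (sup != -1 && ((tokAt ts sup).type == JSMN_OBJECT ||
        ((tokAt ts sup).type == JSMN_STRING && (tokAt ts sup).size != 0))) = false := by
      rcases hty with rfl | ⟨a, rfl, h | ⟨h, h'⟩⟩
      · simp
      · simp [tokAt_nat, h, JSMN_ARRAY, JSMN_OBJECT, JSMN_STRING, -List.getD_eq_getElem?_getD]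
      · simp [tokAt_nat, h, h', JSMN_OBJECT, JSMN_STRING, -List.getD_eq_getElem?_getD]
    have hprim : primitiveCase cfg js fuel n ⟨⟨pos, k, sup⟩, some ts, cnt⟩ = some (.next ⟨⟨pos + t'.length, k + 1, sup⟩,
        some (bump (ts.set k (stampTok cfg ⟨JSMN_PRIMITIVE, pos, (pos + (c0 :: t').length : Nat), 0, sup⟩ (ts.getD k default))) sup), cnt + 1⟩) := by
      have haf := alloc_fill cfg ts (by omega : k < ts.length) JSMN_PRIMITIVE (pos : Int) ((pos + (c0 :: t').length : Nat) : Int) sup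
      simp only at haf
      simp only [primitiveCase, parsePrimitive]
      rcases hstop with ⟨rfl, hs⟩ | ⟨c, r, rfl, hs⟩
      · rw [primScan_eoi cfg js (by omega) (c0 :: t') fuel pos (by simpa using hd) ht (by simp at hq hf ⊢; omega)]
        simp only [hs, Bool.false_eq_true, if_false, allocToken, hk']
        rw [u32_succ (by omega), i32_nat (by omega), i32_nat (by omega), u32_pred (by simp; omega) (by omega)]
        simp only [haf, bumpSuper_some, i32_of_range (by omega : -2147483648 ≤ cnt + 1) hcnt1]
        simp
      · rw [primScan_found cfg js (by omega) (c0 :: t') fuel pos c r hd ht hs (by simp at hq hf ⊢; omega)]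
        simp only [allocToken, hk', if_false]
        rw [u32_succ (by omega), i32_nat (by omega), i32_nat (by omega), u32_pred (by simp; omega) (by omega)]
        simp only [haf, bumpSuper_some, i32_of_range (by omega : -2147483648 ≤ cnt + 1) hcnt1]
        simp
    simp only [body, h1, h2, h3, h4, h5, h6, Bool.false_eq_true, if_false, hc0, if_true, hforb, hprim]
    split <;> rfl

/-! ### `:` and `,` -/

/-- `:` makes the token allocated last (the key) the superior token. -/
theorem colon_trip (hjs : js.length < 2147483648) {pos k : Nat} {sup : Int} {toks : Option Tokens} {cnt : Int} {rest : List UInt8}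
    (hd : js.drop pos = 0x3a :: rest) (hk0 : 0 < k) (hk : k ≤ 2147483648) :
    Reaches cfg js n ⟨⟨pos, k, sup⟩, toks, cnt⟩ ⟨⟨pos + 1, k, ((k - 1 : Nat) : Int)⟩, toks, cnt⟩ := by
  have hlt := lt_of_drop hd
  have t := Reaches.trip (cfg := cfg) (n := n) (s := ⟨⟨pos, k, sup⟩, toks, cnt⟩) hd (by decide) (fun fuel _ => body_colon fuel _)
    (Nat.le_refl _) (by simp; omega)
  have e : i32 ((k : Int) - 1) = ((k - 1 : Nat) : Int) := by rw [i32_of_range (by omega) (by omega)]; omega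
  simp only [e] at t
  exact t

theorem body_comma (fuel : Nat) (s : St) : body cfg js fuel n s 0x2c = some (comma cfg s) := by
  simp [body]

/-- `,` while the superior token is the enclosing array or object: nothing happens. -/
theorem comma_trip_container (hjs : js.length < 2147483648) {pos k a : Nat} {ts : Tokens} {cnt : Int} {rest : List UInt8}
    (hd : js.drop pos = 0x2c :: rest) (hty : (ts.getD a default).type = JSMN_ARRAY ∨ (ts.getD a default).type = JSMN_OBJECT) :
    Reaches cfg js n ⟨⟨pos, k, a⟩, some ts, cnt⟩ ⟨⟨pos + 1, k, a⟩, some ts, cnt⟩ := by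
  have hlt := lt_of_drop hd
  refine Reaches.trip (cfg := cfg) (n := n) (s := ⟨⟨pos, k, a⟩, some ts, cnt⟩) (s' := ⟨⟨pos, k, a⟩, some ts, cnt⟩) hd (by decide) ?_
    (Nat.le_refl _) (by simp; omega)
  intro fuel _
  rw [body_comma]
  rcases hty with h | h <;> simp [comma, tokAt_nat, h, -List.getD_eq_getElem?_getD]

/-- `,` while the superior token is a key (a member's value has just ended): the superior token becomes the enclosing object `o` again —
by the key's parent link, or by the backward scan for an open object or array. -/
theorem comma_trip_key (hjs : js.length < 2147483648) {pos k kk o : Nat} {ts : Tokens} {cnt : Int} {rest : List UInt8}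
    (hd : js.drop pos = 0x2c :: rest) (hty : (ts.getD kk default).type = JSMN_STRING)
    (hpar : cfg.parentLinks = true → (ts.getD kk default).parent = o) (hok : o < k) (hk : k ≤ 2147483648)
    (hopen : (ts.getD o default).isOpen = true) (hoty : (ts.getD o default).type = JSMN_ARRAY ∨ (ts.getD o default).type = JSMN_OBJECT)
    (hcl : ∀ i, o < i → i < k → (ts.getD i default).isOpen = false) :
    Reaches cfg js n ⟨⟨pos, k, kk⟩, some ts, cnt⟩ ⟨⟨pos + 1, k, o⟩, some ts, cnt⟩ := by
  have hlt := lt_of_drop hd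
  refine Reaches.trip (cfg := cfg) (n := n) (s := ⟨⟨pos, k, kk⟩, some ts, cnt⟩) (s' := ⟨⟨pos, k, o⟩, some ts, cnt⟩) hd (by decide) ?_
    (Nat.le_refl _) (by simp; omega)
  intro fuel _
  rw [body_comma]
  have e : i32 ((k : Int) - 1) = ((k - 1 : Nat) : Int) := by rw [i32_of_range (by omega) (by omega)]; omega
  have e2 : (((k - 1 : Nat) : Int) + 1).toNat = k := by omega
  have e3 : ¬ (((k - 1 : Nat) : Int) < 0) := by omega
  cases hl : cfg.parentLinks
  · simp [comma, tokAt_nat, hty, hl, e, e2, e3, JSMN_STRING, JSMN_ARRAY, JSMN_OBJECT, scanOpenContainer_eq_some hopen hoty k hok hcl,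
      -List.getD_eq_getElem?_getD]
  · simp [comma, tokAt_nat, hty, hl, hpar hl, JSMN_STRING, JSMN_ARRAY, JSMN_OBJECT, -List.getD_eq_getElem?_getD]

end
end Jsmn
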